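-- pv_equiv track=rewrite | github.com/MrBrantCode/unitest_baseline | mut_generate/mist_train_cf/cf_86377/solution.py | group_and_sort
-- ===== SOURCE A (Python) =====
-- def group_and_sort(data, shared_key, sorting_key, remove_value):
--     groups = {}
--
--     for d in data:
--         if d[shared_key] not in groups:
--             groups[d[shared_key]] = []
--         groups[d[shared_key]].append(d)
--
--     groups = dict(sorted(groups.items(), key=lambda x: (-sum(d[shared_key] for d in x[1]), min(d[sorting_key] for d in x[1]))))
--
--     filtered_groups = {}
--     for key, value in groups.items():
--         filtered_groups[key] = [d for d in value if d[sorting_key] != remove_value]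
--
--     return filtered_groups
-- ===== SOURCE B (Python) =====
-- def group_and_sort(data, shared_key, sorting_key, remove_value):
--     def rank(k):
--         s = 0
--         m = None
--         for d in data:
--             if d[shared_key] == k:
--                 s += d[shared_key]
--                 v = d[sorting_key]
--                 m = v if m is None or v < m else m
--         return (-s, m)
--
--     remaining = []
--     for d in data:
--         if d[shared_key] not in remaining:
--             remaining.append(d[shared_key])
--
--     result = {}
--     while remaining:
--         best, br = remaining[0], rank(remaining[0])
--         for k in remaining[1:]:
--             r = rank(k)
--             if r < br:
--                 best, br = k, r
--         remaining.remove(best)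
--         result[best] = [d for d in data
--                         if d[shared_key] == best and d[sorting_key] != remove_value]
--     return result
-- ===== Notes on version B (the rewrite author's own statement) =====
-- stated objective: alternative
-- what changed: B drops A's grouping dict and library sort entirely: it collects the distinct keys in first-seen order, then runs a stable selection sort (repeatedly extracting the leftmost key minimal under (-sum, min), with the aggregates computed on demand by scanning data), and emits each group by filtering data directly per selected key.
import Mathlib
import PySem

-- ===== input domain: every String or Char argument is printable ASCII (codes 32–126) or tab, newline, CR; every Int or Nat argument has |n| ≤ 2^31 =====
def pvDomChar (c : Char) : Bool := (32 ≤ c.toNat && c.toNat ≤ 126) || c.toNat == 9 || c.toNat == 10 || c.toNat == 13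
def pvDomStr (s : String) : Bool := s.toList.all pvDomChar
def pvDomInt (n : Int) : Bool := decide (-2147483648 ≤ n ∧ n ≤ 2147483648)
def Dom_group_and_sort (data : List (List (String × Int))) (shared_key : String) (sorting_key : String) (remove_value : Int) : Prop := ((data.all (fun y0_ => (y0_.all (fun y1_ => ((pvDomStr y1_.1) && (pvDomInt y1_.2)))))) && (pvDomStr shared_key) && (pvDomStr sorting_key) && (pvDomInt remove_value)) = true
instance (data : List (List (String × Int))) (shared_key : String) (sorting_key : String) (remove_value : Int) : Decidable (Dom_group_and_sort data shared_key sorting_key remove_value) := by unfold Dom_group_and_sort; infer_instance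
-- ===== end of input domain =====

-- B drops A's grouping dict and library sort: it collects the distinct keys in first-seen order,
-- then stable-selection-sorts them (repeatedly extracting the leftmost key minimal under
-- (-sum, min), aggregates computed on demand by scanning data) and emits each group by
-- filtering data per selected key (objective: alternative algorithm, not faster).


-- ===== PORT A =====
-- d[k] for a record d (a Python dict); Pre_ guarantees the key is present, so the default 0 is never used on admitted inputs
def pvLook (d : List (String × Int)) (k : String) : Int := (PySem.Dict.ofList d).getD k 0

-- body of A's grouping loop: 'if d[shared_key] not in groups: groups[d[shared_key]] = []; groups[d[shared_key]].append(d)'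
def pvGroupStepA (shared_key : String) (groups : PySem.Dict Int (List (List (String × Int)))) (d : List (String × Int)) : PySem.Dict Int (List (List (String × Int))) :=
  let groups := if groups.contains (pvLook d shared_key) then groups else groups.insert (pvLook d shared_key) []
  groups.insert (pvLook d shared_key) (groups.getD (pvLook d shared_key) [] ++ [d])

def group_and_sort (data : List (List (String × Int))) (shared_key : String) (sorting_key : String) (remove_value : Int) : List (Int × List (List (String × Int))) :=
  let groups := data.foldl (pvGroupStepA shared_key) PySem.Dict.empty
  let sortedGroups := PySem.List.sorted2 groups.items
    (fun x => -((x.2.map (fun d => pvLook d shared_key)).sum))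
    (fun x => (PySem.List.min? (x.2.map (fun d => pvLook d sorting_key)) (fun y => y)).getD 0)
  let filtered := sortedGroups.foldl
    (fun fg kv => fg.insert kv.1 (kv.2.filter (fun d => pvLook d sorting_key != remove_value)))
    PySem.Dict.empty
  filtered.items

-- ===== PORT B =====
-- Python tuple comparison r < br on the (−sum, min) pairs: lexicographic
def pvLexLt (u v : Int × Int) : Bool := decide (u.1 < v.1) || (decide (u.1 = v.1) && decide (u.2 < v.2))

-- body of B's 'rank' scan over data ('if d[shared_key] == k: s += …; m = v if m is None or v < m else m')
def pvRankStep (shared_key sorting_key : String) (k : Int) (st : Int × Option Int) (d : List (String × Int)) : Int × Option Int :=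
  if pvLook d shared_key == k then
    (st.1 + pvLook d shared_key,
     some (match st.2 with
           | none => pvLook d sorting_key
           | some m => if pvLook d sorting_key < m then pvLook d sorting_key else m))
  else st

-- B's rank(k) = (-s, m); rank is only applied to keys occurring in data, where m is some, so the
-- .getD 0 for Python's None is never used there
def pvRank (data : List (List (String × Int))) (shared_key sorting_key : String) (k : Int) : Int × Int :=
  let st := data.foldl (pvRankStep shared_key sorting_key k) (0, none)
  (-st.1, st.2.getD 0)

-- body of B's inner selection loop, carrying (best, br)
def pvPickStep (rank : Int → Int × Int) (bb : Int × (Int × Int)) (k : Int) : Int × (Int × Int) :=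
  let r := rank k
  if pvLexLt r bb.2 then (k, r) else bb

-- the pick of B's inner loop, as a named value ('best' after the for-loop)
def pvBest (rank : Int → Int × Int) (x : Int) (t : List Int) : Int :=
  (t.foldl (pvPickStep rank) (x, rank x)).1

-- termination helper for pvSelect: the picked best is a member of the list
lemma pv_best_mem (rank : Int → Int × Int) (x : Int) (t : List Int) :
    pvBest rank x t ∈ x :: t := by
  unfold pvBest
  suffices h : ∀ (t : List Int) (bb : Int × (Int × Int)),
      (t.foldl (pvPickStep rank) bb).1 = bb.1 ∨ (t.foldl (pvPickStep rank) bb).1 ∈ t by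
    rcases h t (x, rank x) with h' | h'
    · rw [h']; exact List.mem_cons_self
    · exact List.mem_cons_of_mem x h'
  intro t
  induction t with
  | nil => intro bb; exact Or.inl rfl
  | cons k t ih =>
    intro bb
    rw [List.foldl_cons]
    rcases ih (pvPickStep rank bb k) with h' | h'
    · by_cases hc : pvLexLt (rank k) bb.2 = true
      · right; rw [h']; simp [pvPickStep, hc]
      · left; rw [h']; simp [pvPickStep, hc]
    · exact Or.inr (List.mem_cons_of_mem k h')

-- B's while loop: extract the leftmost minimal key, remove it ('remaining.remove(best)' — the
-- best is always present, so list.remove is exactly List.erase), recurse on the rest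
def pvSelect (rank : Int → Int × Int) : List Int → List Int
  | [] => []
  | x :: t => pvBest rank x t :: pvSelect rank ((x :: t).erase (pvBest rank x t))
termination_by l => l.length
decreasing_by
  rw [List.length_erase_of_mem (pv_best_mem rank x t)]
  simp

def group_and_sort_alt (data : List (List (String × Int))) (shared_key : String) (sorting_key : String) (remove_value : Int) : List (Int × List (List (String × Int))) :=
  let keys := data.foldl (fun s d => PySem.Set.add s (pvLook d shared_key)) PySem.Set.empty
  let order := pvSelect (pvRank data shared_key sorting_key) keys
  order.map (fun k => (k, data.filter (fun d => pvLook d shared_key == k && pvLook d sorting_key != remove_value)))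

-- ===== PRECONDITION & SPEC =====
-- Pre_ excludes exactly the inputs where a record lacks shared_key or sorting_key: there Python A raises KeyError.
def Pre_group_and_sort (data : List (List (String × Int))) (shared_key : String) (sorting_key : String) (remove_value : Int) : Prop :=
  ∀ d ∈ data, (PySem.Dict.ofList d).contains shared_key = true ∧ (PySem.Dict.ofList d).contains sorting_key = true
instance (data : List (List (String × Int))) (shared_key : String) (sorting_key : String) (remove_value : Int) : Decidable (Pre_group_and_sort data shared_key sorting_key remove_value) := by unfold Pre_group_and_sort; infer_instance

def pvWitness_group_and_sort : (List (List (String × Int))) × String × String × Int :=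
  ([[("g", 1), ("v", 2)], [("g", 1), ("v", 3)], [("g", 2), ("v", 3)]], "g", "v", 3)

def Spec_group_and_sort (data : List (List (String × Int))) (shared_key : String) (sorting_key : String) (remove_value : Int) (out : List (Int × List (List (String × Int)))) : Prop := out = group_and_sort_alt data shared_key sorting_key remove_value
instance (data : List (List (String × Int))) (shared_key : String) (sorting_key : String) (remove_value : Int) (out : List (Int × List (List (String × Int)))) : Decidable (Spec_group_and_sort data shared_key sorting_key remove_value out) := by unfold Spec_group_and_sort; infer_instance

-- ===== CLAIM (what is proved, stated in full; the proofs are below) =====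
def Claim_equal_group_and_sort : Prop := ∀ (data : List (List (String × Int))) (shared_key : String) (sorting_key : String) (remove_value : Int), Dom_group_and_sort data shared_key sorting_key remove_value → Pre_group_and_sort data shared_key sorting_key remove_value → Spec_group_and_sort data shared_key sorting_key remove_value (group_and_sort data shared_key sorting_key remove_value)

-- ===== LEMMAS AND PROOFS =====

-- ---------- order facts about the lexicographic comparator ----------

lemma pv_lexlt_true_iff (u v : Int × Int) :
    pvLexLt u v = true ↔ (u.1 < v.1 ∨ (u.1 = v.1 ∧ u.2 < v.2)) := by
  simp [pvLexLt]

lemma pv_lexlt_irrefl (u : Int × Int) : pvLexLt u u = false := by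
  simp [pvLexLt]

lemma pv_lexlt_trans {u v w : Int × Int} (h1 : pvLexLt u v = true) (h2 : pvLexLt v w = true) :
    pvLexLt u w = true := by
  rw [pv_lexlt_true_iff] at *
  omega

lemma pv_lexlt_asymm {u v : Int × Int} (h : pvLexLt u v = true) : pvLexLt v u = false := by
  cases h2 : pvLexLt v u
  · rfl
  · have := pv_lexlt_trans h h2
    rw [pv_lexlt_irrefl] at this
    exact absurd this (by simp)

lemma pv_lexlt_total {u v : Int × Int} (h : pvLexLt u v = false) :
    pvLexLt v u = true ∨ u = v := by
  by_cases he : u = v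
  · exact Or.inr he
  · left
    rw [← Bool.not_eq_true, pv_lexlt_true_iff] at h
    rw [Prod.ext_iff] at he
    rw [pv_lexlt_true_iff]
    omega

-- sorted2's comparator on key functions (rank ·).1 / (rank ·).2 is exactly pvLexLt of the ranks
lemma pv_cmp_eq (u v : Int × Int) :
    (decide (u.1 < v.1) || (!decide (v.1 < u.1) && decide (u.2 < v.2))) = pvLexLt u v := by
  by_cases h1 : u.1 < v.1 <;> by_cases h2 : v.1 < u.1 <;> by_cases h3 : u.1 = v.1 <;>
    simp [pvLexLt, h1, h2, h3] <;> omega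

-- ---------- generic: stable insertion sort = leftmost-min selection sort ----------

lemma pv_mem_foldl_insertBy {α : Type} (lt : α → α → Bool) :
    ∀ (l acc : List α) (y : α), y ∈ l.foldl (fun a x => PySem.List.insertBy lt x a) acc →
      y ∈ acc ∨ y ∈ l := by
  intro l
  induction l with
  | nil => intro acc y h; exact Or.inl h
  | cons x t ih =>
    intro acc y h
    rw [List.foldl_cons] at h
    rcases ih _ y h with h' | h'
    · rcases (PySem.List.mem_insertBy _ _ _ _).1 h' with h'' | h''
      · exact Or.inr (by simp [h''])
      · exact Or.inl h''
    · exact Or.inr (List.mem_cons_of_mem x h')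

lemma pv_insertBy_front {α : Type} (lt : α → α → Bool) (m : α) (acc : List α)
    (h : ∀ y ∈ acc, lt m y = true) : PySem.List.insertBy lt m acc = m :: acc := by
  cases acc with
  | nil => rfl
  | cons y ys => simp [PySem.List.insertBy, h y (by simp)]

lemma pv_foldl_insertBy_skip {α : Type} (lt : α → α → Bool) (m : α) :
    ∀ (s acc : List α), (∀ y ∈ s, lt y m = false) →
      s.foldl (fun a x => PySem.List.insertBy lt x a) (m :: acc)
        = m :: s.foldl (fun a x => PySem.List.insertBy lt x a) acc := by
  intro s
  induction s with
  | nil => intro acc _; rfl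
  | cons y s' ih =>
    intro acc h
    rw [List.foldl_cons, List.foldl_cons]
    have hy : lt y m = false := h y (by simp)
    have : PySem.List.insertBy lt y (m :: acc) = m :: PySem.List.insertBy lt y acc := by
      simp [PySem.List.insertBy, hy]
    rw [this]
    exact ih _ (fun z hz => h z (by simp [hz]))

-- the simple (value-only) form of B's inner pick loop
def pvPickSimple (rank : Int → Int × Int) (t : List Int) (x : Int) : Int :=
  t.foldl (fun bb k => if pvLexLt (rank k) (rank bb) then k else bb) x

lemma pv_pick_fold_eq (rank : Int → Int × Int) :
    ∀ (t : List Int) (x : Int),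
      t.foldl (pvPickStep rank) (x, rank x) = (pvPickSimple rank t x, rank (pvPickSimple rank t x)) := by
  intro t
  induction t with
  | nil => intro x; rfl
  | cons k t ih =>
    intro x
    rw [List.foldl_cons]
    by_cases hc : pvLexLt (rank k) (rank x) = true
    · have h1 : pvPickStep rank (x, rank x) k = (k, rank k) := by simp [pvPickStep, hc]
      have h2 : pvPickSimple rank (k :: t) x = pvPickSimple rank t k := by
        simp [pvPickSimple, hc]
      rw [h1, h2]
      exact ih k
    · have h1 : pvPickStep rank (x, rank x) k = (x, rank x) := by simp [pvPickStep, hc]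
      have h2 : pvPickSimple rank (k :: t) x = pvPickSimple rank t x := by
        simp [pvPickSimple, hc]
      rw [h1, h2]
      exact ih x

lemma pv_best_eq (rank : Int → Int × Int) (x : Int) (t : List Int) :
    pvBest rank x t = pvPickSimple rank t x := by
  unfold pvBest
  rw [pv_pick_fold_eq]

-- the picked element splits the list into strictly-greater prefix and not-smaller suffix
lemma pv_pick_spec (rank : Int → Int × Int) :
    ∀ (t : List Int) (x : Int), ∃ p s,
      x :: t = p ++ (pvPickSimple rank t x) :: s ∧
      (∀ y ∈ p, pvLexLt (rank (pvPickSimple rank t x)) (rank y) = true) ∧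
      (∀ y ∈ s, pvLexLt (rank y) (rank (pvPickSimple rank t x)) = false) ∧
      (∀ y ∈ x :: t, pvLexLt (rank y) (rank (pvPickSimple rank t x)) = false) := by
  intro t
  induction t with
  | nil =>
    intro x
    refine ⟨[], [], rfl, by simp, by simp, ?_⟩
    intro y hy
    simp at hy
    subst hy
    exact pv_lexlt_irrefl _
  | cons k t ih =>
    intro x
    by_cases hc : pvLexLt (rank k) (rank x) = true
    · -- x' = k: the pick over k :: t is the pick over t from k
      have hps : pvPickSimple rank (k :: t) x = pvPickSimple rank t k := by
        simp [pvPickSimple, hc]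
      obtain ⟨p', s', heq, hp, hs, hmin⟩ := ih k
      set b := pvPickSimple rank t k with hbdef
      have hbk : pvLexLt (rank k) (rank b) = false := hmin k (by simp)
      have hbx : pvLexLt (rank b) (rank x) = true := by
        rcases pv_lexlt_total hbk with h' | h'
        · exact pv_lexlt_trans h' hc
        · rw [← h']; exact hc
      refine ⟨x :: p', s', ?_, ?_, ?_, ?_⟩
      · rw [hps, List.cons_append, ← heq]
      · intro y hy
        rw [hps]
        rcases List.mem_cons.1 hy with h' | h'
        · rw [h']; exact hbx
        · exact hp y h'
      · intro y hy; rw [hps]; exact hs y hy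
      · intro y hy
        rw [hps]
        rcases List.mem_cons.1 hy with h' | h'
        · rw [h']; exact pv_lexlt_asymm hbx
        · exact hmin y (heq ▸ (by rw [← heq]; exact h'))
    · -- x' = x: the pick over k :: t is the pick over t from x
      have hc' : pvLexLt (rank k) (rank x) = false := by
        cases h : pvLexLt (rank k) (rank x)
        · rfl
        · exact absurd h hc
      have hps : pvPickSimple rank (k :: t) x = pvPickSimple rank t x := by
        simp [pvPickSimple, hc']
      obtain ⟨p', s', heq, hp, hs, hmin⟩ := ih x
      set b := pvPickSimple rank t x with hbdef
      cases p' with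
      | nil =>
        rw [List.nil_append] at heq
        injection heq with hbx ht
        -- hbx : x = b,  ht : t = s'
        refine ⟨[], k :: s', ?_, by simp, ?_, ?_⟩
        · rw [hps, ← hbx, ht]; rfl
        · intro y hy
          rw [hps]
          rcases List.mem_cons.1 hy with h' | h'
          · rw [h', ← hbx]; exact hc'
          · exact hs y h'
        · intro y hy
          rw [hps]
          rcases List.mem_cons.1 hy with h' | h'
          · rw [h', ← hbx]; exact pv_lexlt_irrefl _
          · rcases List.mem_cons.1 h' with h'' | h''
            · rw [h'', ← hbx]; exact hc'
            · exact hmin y (List.mem_cons_of_mem x h'')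
      | cons a p'' =>
        rw [List.cons_append] at heq
        injection heq with hax ht
        -- hax : x = a,  ht : t = p'' ++ b :: s'
        have hbx : pvLexLt (rank b) (rank x) = true := by
          rw [hax]; exact hp a (by simp)
        have hbk : pvLexLt (rank b) (rank k) = true := by
          rcases pv_lexlt_total hc' with h' | h'
          · exact pv_lexlt_trans hbx h'
          · rw [h']; exact hbx
        refine ⟨x :: k :: p'', s', ?_, ?_, ?_, ?_⟩
        · rw [hps, ht]; rfl
        · intro y hy
          rw [hps]
          rcases List.mem_cons.1 hy with h' | h'
          · rw [h']; exact hbx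
          · rcases List.mem_cons.1 h' with h'' | h''
            · rw [h'']; exact hbk
            · exact hp y (by simp [h''])
        · intro y hy; rw [hps]; exact hs y hy
        · intro y hy
          rw [hps]
          rcases List.mem_cons.1 hy with h' | h'
          · rw [h']; exact hmin x (by simp)
          · rcases List.mem_cons.1 h' with h'' | h''
            · rw [h'']; exact pv_lexlt_asymm hbk
            · exact hmin y (by simp [h''])

-- insertion sort with the lex comparator computes the selection sort
lemma pv_sel_eq_fold (rank : Int → Int × Int) :
    ∀ (n : Nat) (l : List Int), l.length ≤ n →
      l.foldl (fun a x => PySem.List.insertBy (fun a b => pvLexLt (rank a) (rank b)) x a) []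
        = pvSelect rank l := by
  intro n
  induction n with
  | zero =>
    intro l hl
    cases l with
    | nil => rw [List.foldl_nil, pvSelect]
    | cons x t => simp at hl
  | succ n ih =>
    intro l hl
    cases l with
    | nil => rw [List.foldl_nil, pvSelect]
    | cons x t =>
      obtain ⟨p, s, heq, hp, hs, _⟩ := pv_pick_spec rank t x
      set b := pvPickSimple rank t x with hbdef
      have hbp : b ∉ p := by
        intro hmem
        have := hp b hmem
        rw [pv_lexlt_irrefl] at this
        exact Bool.false_ne_true this
      have herase : (x :: t).erase b = p ++ s := by
        rw [heq, List.erase_append_right _ hbp, List.erase_cons_head]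
      have hlen : (p ++ s).length ≤ n := by
        have h2 : (x :: t).length = (p ++ (b :: s)).length := by rw [heq]
        simp at h2 hl ⊢
        omega
      have hlhs : (x :: t).foldl (fun a x => PySem.List.insertBy (fun a b => pvLexLt (rank a) (rank b)) x a) []
          = b :: (p ++ s).foldl (fun a x => PySem.List.insertBy (fun a b => pvLexLt (rank a) (rank b)) x a) [] := by
        rw [heq, List.foldl_append, List.foldl_cons, List.foldl_append]
        rw [pv_insertBy_front _ b _ (fun y hy => by
          rcases pv_mem_foldl_insertBy _ p [] y hy with h' | h'
          · exact absurd h' (by simp)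
          · exact hp y h')]
        exact pv_foldl_insertBy_skip _ b s _ hs
      rw [hlhs, ih (p ++ s) hlen, pvSelect, pv_best_eq, ← hbdef, herase]

-- ---------- A-side reductions ----------

-- A's grouping step written as a single dict.modify
def pvModStep (shared_key : String) (g : PySem.Dict Int (List (List (String × Int)))) (d : List (String × Int)) : PySem.Dict Int (List (List (String × Int))) :=
  g.modify (pvLook d shared_key) [] (fun v => v ++ [d])

lemma pvGroupStepA_eq_mod (shared_key : String) : pvGroupStepA shared_key = pvModStep shared_key := by
  funext g d
  unfold pvGroupStepA pvModStep PySem.Dict.modify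
  by_cases hc : g.contains (pvLook d shared_key) = true
  · simp [hc]
  · simp only [Bool.not_eq_true] at hc
    simp only [hc, Bool.false_eq_true, if_false]
    rw [PySem.Dict.getD_insert_self, PySem.Dict.insert_insert_self,
      PySem.Dict.getD_of_not_contains g _ hc]

-- sorted2 of a mapped list / with pointwise-equal keys (structural lemmas about insertBy folds)
lemma pv_insertBy_congr {α : Type} (bef bef' : α → α → Bool) (x : α) (ys : List α)
    (h : ∀ y ∈ ys, bef x y = bef' x y) :
    PySem.List.insertBy bef x ys = PySem.List.insertBy bef' x ys := by
  induction ys with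
  | nil => rfl
  | cons y t ih =>
    have hy := h y (by simp)
    simp only [PySem.List.insertBy, hy]
    split
    · rfl
    · have := ih (fun z hz => h z (by simp [hz]))
      simpa [PySem.List.insertBy] using congrArg (y :: ·) this

lemma pv_foldl_insertBy_congr {α : Type} (bef bef' : α → α → Bool) (S : List α)
    (hS : ∀ x ∈ S, ∀ y ∈ S, bef x y = bef' x y) :
    ∀ (l acc : List α), (∀ x ∈ l, x ∈ S) → (∀ y ∈ acc, y ∈ S) →
      l.foldl (fun acc x => PySem.List.insertBy bef x acc) acc
        = l.foldl (fun acc x => PySem.List.insertBy bef' x acc) acc := by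
  intro l
  induction l with
  | nil => intro acc _ _; rfl
  | cons x t ih =>
    intro acc hl hacc
    have hx : x ∈ S := hl x (by simp)
    simp only [List.foldl_cons]
    rw [pv_insertBy_congr bef bef' x acc (fun y hy => hS x hx y (hacc y hy))]
    exact ih _ (fun z hz => hl z (by simp [hz]))
      (fun y hy => ((PySem.List.mem_insertBy _ _ _ _).1 hy).elim (fun h => h ▸ hx) (hacc y))

lemma pv_insertBy_map {α β : Type} (h : α → β) (bef : β → β → Bool) (x : α) :
    ∀ ys : List α, PySem.List.insertBy bef (h x) (ys.map h)
      = (PySem.List.insertBy (fun a b => bef (h a) (h b)) x ys).map h := by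
  intro ys
  induction ys with
  | nil => rfl
  | cons y t ih =>
    simp only [List.map_cons, PySem.List.insertBy]
    split
    · rfl
    · simpa [PySem.List.insertBy] using congrArg (h y :: ·) ih

lemma pv_foldl_insertBy_map {α β : Type} (h : α → β) (bef : β → β → Bool) :
    ∀ (l ys : List α),
      l.foldl (fun acc x => PySem.List.insertBy bef (h x) acc) (ys.map h)
        = (l.foldl (fun acc x => PySem.List.insertBy (fun a b => bef (h a) (h b)) x acc) ys).map h := by
  intro l
  induction l with
  | nil => intro ys; rfl
  | cons x t ih =>
    intro ys
    simp only [List.foldl_cons]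
    rw [pv_insertBy_map h bef x ys]
    exact ih _

lemma pv_sorted2_map {α β κ₁ κ₂ : Type} [LT κ₁] [DecidableLT κ₁] [LT κ₂] [DecidableLT κ₂]
    (h : α → β) (l : List α) (k1 : β → κ₁) (k2 : β → κ₂) :
    PySem.List.sorted2 (l.map h) k1 k2
      = (PySem.List.sorted2 l (fun x => k1 (h x)) (fun x => k2 (h x))).map h := by
  simp only [PySem.List.sorted2, if_neg (by decide : ¬ (false = true)), List.foldl_map]
  have := pv_foldl_insertBy_map h
    (fun a b => decide (k1 a < k1 b) || !decide (k1 b < k1 a) && decide (k2 a < k2 b)) l []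
  simpa using this

lemma pv_sorted2_congr {α κ₁ κ₂ : Type} [LT κ₁] [DecidableLT κ₁] [LT κ₂] [DecidableLT κ₂]
    (l : List α) (k1 k1' : α → κ₁) (k2 k2' : α → κ₂)
    (h1 : ∀ x ∈ l, k1 x = k1' x) (h2 : ∀ x ∈ l, k2 x = k2' x) :
    PySem.List.sorted2 l k1 k2 = PySem.List.sorted2 l k1' k2' := by
  simp only [PySem.List.sorted2, if_neg (by decide : ¬ (false = true))]
  exact pv_foldl_insertBy_congr _ _ l
    (fun x hx y hy => by rw [h1 x hx, h1 y hy, h2 x hx, h2 y hy]) l [] (fun x hx => hx) (by simp)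

-- sorted2 with the rank components as keys IS the selection sort
lemma pv_sorted2_eq_select (rank : Int → Int × Int) (l : List Int) :
    PySem.List.sorted2 l (fun k => (rank k).1) (fun k => (rank k).2) = pvSelect rank l := by
  simp only [PySem.List.sorted2, if_neg (by decide : ¬ (false = true))]
  have hcmp : (fun (a b : Int) => decide ((rank a).1 < (rank b).1)
      || (!decide ((rank b).1 < (rank a).1) && decide ((rank a).2 < (rank b).2)))
      = fun a b => pvLexLt (rank a) (rank b) := by
    funext a b
    exact pv_cmp_eq (rank a) (rank b)
  rw [hcmp]
  exact pv_sel_eq_fold rank l.length l (le_refl _)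

-- A's group of k is the data filtered to key k
lemma pv_getD_group (data : List (List (String × Int))) (shared_key : String) (k : Int) :
    (data.foldl (pvModStep shared_key) PySem.Dict.empty).getD k []
      = data.filter (fun d => pvLook d shared_key == k) := by
  have h1 : data.foldl (pvModStep shared_key) PySem.Dict.empty
      = (data.map (fun d => (pvLook d shared_key, d))).foldl
          (fun g p => g.modify p.1 [] (fun v => v ++ [p.2])) PySem.Dict.empty := by
    rw [List.foldl_map]
    rfl
  rw [h1, PySem.Dict.getD_foldl_modify_append]
  rw [PySem.Dict.getD_empty, List.nil_append]
  rw [List.filter_map, List.map_map]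
  simp [Function.comp_def]

-- B's rank over the group members (the then-branch of pvRankStep, folded from a set accumulator)
lemma pv_rank_aux (shared_key sorting_key : String) (k : Int) :
    ∀ (l : List (List (String × Int))) (s m : Int),
      (∀ d ∈ l, pvLook d shared_key == k) →
      l.foldl (pvRankStep shared_key sorting_key k) (s, some m)
        = (s + (l.map (fun d => pvLook d shared_key)).sum,
           some ((l.map (fun d => pvLook d sorting_key)).foldl min m)) := by
  intro l
  induction l with
  | nil => intro s m _; simp
  | cons d rest ih =>
    intro s m hmem
    have hd : (pvLook d shared_key == k) = true := hmem d (by simp)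
    rw [List.foldl_cons]
    have hstep : pvRankStep shared_key sorting_key k (s, some m) d
        = (s + pvLook d shared_key, some (min m (pvLook d sorting_key))) := by
      unfold pvRankStep
      rw [if_pos hd]
      have : (if pvLook d sorting_key < m then pvLook d sorting_key else m)
          = min m (pvLook d sorting_key) := by
        rw [min_def]; split_ifs <;> omega
      simp [this]
    rw [hstep, ih _ _ (fun d' hd' => hmem d' (by simp [hd']))]
    simp [add_assoc]

-- for a key occurring in data, B's rank equals A's sort key (−group sum, group min)
lemma pv_rank_eq (data : List (List (String × Int))) (shared_key sorting_key : String) (k : Int)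
    (hk : data.filter (fun d => pvLook d shared_key == k) ≠ []) :
    pvRank data shared_key sorting_key k
      = (-(((data.filter (fun d => pvLook d shared_key == k)).map (fun d => pvLook d shared_key)).sum),
         (PySem.List.min? ((data.filter (fun d => pvLook d shared_key == k)).map (fun d => pvLook d sorting_key)) (fun y => y)).getD 0) := by
  unfold pvRank
  have h1 : data.foldl (pvRankStep shared_key sorting_key k) ((0 : Int), (none : Option Int))
      = (data.filter (fun d => pvLook d shared_key == k)).foldl
          (pvRankStep shared_key sorting_key k) (0, none) := by
    have h2 : data.foldl (pvRankStep shared_key sorting_key k) ((0 : Int), (none : Option Int))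
        = (data.filter (fun d => pvLook d shared_key == k)).foldl
            (fun (st : Int × Option Int) d => (st.1 + pvLook d shared_key,
              some (match st.2 with
                    | none => pvLook d sorting_key
                    | some m => if pvLook d sorting_key < m then pvLook d sorting_key else m)))
            (0, none) :=
      PySem.List.foldl_if_eq_foldl_filter _ _ _ _
    rw [h2]
    apply PySem.List.foldl_congr_mem
    intro st d hd
    unfold pvRankStep
    rw [if_pos (List.mem_filter.1 hd).2]
  rw [h1]
  cases hgrp : data.filter (fun d => pvLook d shared_key == k) with
  | nil => exact absurd hgrp hk
  | cons d0 rest =>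
    have hmem : ∀ d ∈ rest, pvLook d shared_key == k := by
      intro d hd
      have : d ∈ data.filter (fun d => pvLook d shared_key == k) := by rw [hgrp]; simp [hd]
      exact (List.mem_filter.1 this).2
    have hd0 : (pvLook d0 shared_key == k) = true := by
      have : d0 ∈ data.filter (fun d => pvLook d shared_key == k) := by rw [hgrp]; simp
      exact (List.mem_filter.1 this).2
    rw [List.foldl_cons]
    have hstep : pvRankStep shared_key sorting_key k (0, none) d0
        = (0 + pvLook d0 shared_key, some (pvLook d0 sorting_key)) := by
      unfold pvRankStep
      rw [if_pos hd0]
    rw [hstep, pv_rank_aux shared_key sorting_key k rest _ _ hmem]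
    rw [List.map_cons, List.map_cons, List.sum_cons, PySem.List.min?_id_cons]
    simp

set_option maxRecDepth 8192 in
lemma pv_main (data : List (List (String × Int))) (shared_key sorting_key : String) (remove_value : Int) :
    group_and_sort data shared_key sorting_key remove_value
      = group_and_sort_alt data shared_key sorting_key remove_value := by
  show (List.foldl (fun fg kv => fg.insert kv.1 (kv.2.filter (fun d => pvLook d sorting_key != remove_value))) PySem.Dict.empty
      (PySem.List.sorted2 (data.foldl (pvGroupStepA shared_key) PySem.Dict.empty).items
        (fun x => -((x.2.map (fun d => pvLook d shared_key)).sum))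
        (fun x => (PySem.List.min? (x.2.map (fun d => pvLook d sorting_key)) (fun y => y)).getD 0))).items
    = (pvSelect (pvRank data shared_key sorting_key)
        (data.foldl (fun s d => PySem.Set.add s (pvLook d shared_key)) PySem.Set.empty)).map
        (fun k => (k, data.filter (fun d => pvLook d shared_key == k && pvLook d sorting_key != remove_value)))
  rw [pvGroupStepA_eq_mod]
  set gA := data.foldl (pvModStep shared_key) PySem.Dict.empty with hgA
  have hnd : gA.keys.Nodup := by
    have := PySem.Dict.nodup_keys_foldl_modify_key data (fun d => pvLook d shared_key)
      ([] : List (List (String × Int))) (fun _ d v => v ++ [d]) PySem.Dict.empty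
      (by rw [PySem.Dict.keys_empty]; exact List.nodup_nil)
    exact this
  -- keys of the grouping dict = B's first-seen distinct key list
  have hkeys : gA.keys = data.foldl (fun s d => PySem.Set.add s (pvLook d shared_key)) PySem.Set.empty := by
    have h1 : gA.keys = PySem.Set.update PySem.Dict.empty.keys
        (data.map (fun d => pvLook d shared_key)) :=
      PySem.Dict.keys_foldl_modify_key data (fun d => pvLook d shared_key) _ _ _
    rw [h1, PySem.Dict.keys_empty, PySem.Set.update_map_eq_foldl_add]
    rfl
  -- every key in the dict has a nonempty group
  have hmemkey : ∀ k ∈ gA.keys, data.filter (fun d => pvLook d shared_key == k) ≠ [] := by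
    intro k hk
    have h1 : gA.keys = PySem.Set.update ([] : List Int)
        (data.map (fun d => pvLook d shared_key)) := by
      rw [hkeys, PySem.Set.update_map_eq_foldl_add]; rfl
    rw [h1] at hk
    have hk2 : k ∈ data.map (fun d => pvLook d shared_key) := by
      rcases (PySem.Set.mem_update _ _ _).1 hk with h' | h'
      · exact absurd h' (by simp)
      · exact h'
    obtain ⟨d, hd, hdk⟩ := List.mem_map.1 hk2
    intro hnil
    have : d ∈ data.filter (fun d => pvLook d shared_key == k) :=
      List.mem_filter.2 ⟨hd, by simp [hdk]⟩
    rw [hnil] at this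
    exact absurd this (by simp)
  have hgetD : ∀ k, gA.getD k [] = data.filter (fun d => pvLook d shared_key == k) := by
    intro k
    rw [hgA]
    exact pv_getD_group data shared_key k
  rw [PySem.Dict.items_eq_map_keys gA hnd ([] : List (List (String × Int)))]
  rw [pv_sorted2_map (fun k => (k, gA.getD k [])) gA.keys]
  simp only [hgetD]
  -- the two sort keys are the components of B's rank, for every key in the list
  rw [pv_sorted2_congr gA.keys _ (fun k => (pvRank data shared_key sorting_key k).1) _
      (fun k => (pvRank data shared_key sorting_key k).2)
      (fun k hk => by
        show _ = (pvRank data shared_key sorting_key k).1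
        rw [pv_rank_eq data shared_key sorting_key k (hmemkey k hk)])
      (fun k hk => by
        show _ = (pvRank data shared_key sorting_key k).2
        rw [pv_rank_eq data shared_key sorting_key k (hmemkey k hk)])]
  set order := PySem.List.sorted2 gA.keys
    (fun k => (pvRank data shared_key sorting_key k).1)
    (fun k => (pvRank data shared_key sorting_key k).2) with horder
  have hordnd : order.Nodup := ((PySem.List.sorted2_perm gA.keys _ _ false).nodup_iff).2 hnd
  have hfresh : ∀ a ∈ order.map (fun k => (k, data.filter (fun d => pvLook d shared_key == k))),
      (PySem.Dict.empty : PySem.Dict Int (List (List (String × Int)))).contains a.1 = false := by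
    intro a _; exact PySem.Dict.contains_empty a.1
  have hmapnd : ((order.map (fun k => (k, data.filter (fun d => pvLook d shared_key == k)))).map Prod.fst).Nodup := by
    rw [List.map_map]
    simpa [Function.comp_def] using hordnd
  rw [PySem.Dict.items_foldl_insert_fresh
    (order.map (fun k => (k, data.filter (fun d => pvLook d shared_key == k)))) Prod.fst
    (fun kv => kv.2.filter (fun d => pvLook d sorting_key != remove_value)) PySem.Dict.empty
    hfresh hmapnd]
  have hemp : (PySem.Dict.empty : PySem.Dict Int (List (List (String × Int)))).items = [] := rfl
  rw [hemp, List.nil_append, List.map_map]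
  rw [horder, pv_sorted2_eq_select (pvRank data shared_key sorting_key) gA.keys, hkeys]
  -- the per-key outputs agree: filtering the group then removing = one combined filter of data
  refine List.map_congr_left (fun k _ => ?_)
  simp only [Function.comp_def]
  rw [List.filter_filter]
  refine congrArg (fun l => (k, l)) (List.filter_congr (fun d _ => ?_))
  exact Bool.and_comm _ _

-- ===== VERDICT (by name: the statement is the Claim_ definition above) =====
theorem group_and_sort_spec : Claim_equal_group_and_sort := by
  intro data shared_key sorting_key remove_value _ _
  exact pv_main data shared_key sorting_key remove_value
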